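-- pv_equiv track=rewrite | github.com/binary-husky/gpt_academic | comm_tools/func_box.py | to_markdown_tabs
-- ===== SOURCE A (Python) =====
-- def to_markdown_tabs(head: list, tabs: list, alignment=':---:', column=False):
--     """
--     Args:
--         head: 表头：[]
--         tabs: 表值：[[列1], [列2], [列3], [列4]]
--         alignment: :--- 左对齐， :---: 居中对齐， ---: 右对齐
--         column: True to keep data in columns, False to keep data in rows (default).
--     Returns:
--         A string representation of the markdown table.
--     """
--     if column:
--         transposed_tabs = list(map(list, zip(*tabs)))
--     else:
--         transposed_tabs = tabs
--     # Find the maximum length among the columns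
--     max_len = max(len(column) for column in transposed_tabs)
--
--     tab_format = "| %s "
--     tabs_list = "".join([tab_format % i for i in head]) + '|\n'
--     tabs_list += "".join([tab_format % alignment for i in head]) + '|\n'
--
--     for i in range(max_len):
--         row_data = [tab[i] if i < len(tab) else '' for tab in transposed_tabs]
--         tabs_list += "".join([tab_format % i for i in row_data]) + '|\n'
--     return tabs_list
-- ===== SOURCE B (Python) =====
-- def to_markdown_tabs(head: list, tabs: list, alignment=':---:', column=False):
--     if column:
--         cols = list(map(list, zip(*tabs)))
--     else:
--         cols = tabs
--     max_len = max(len(c) for c in cols)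
--     padded = [c + [''] * (max_len - len(c)) for c in cols]
--     rows = [list(head), [alignment] * len(head)] + [list(r) for r in zip(*padded)]
--     return ''.join(''.join('| %s ' % cell for cell in row) + '|\n' for row in rows)
-- ===== Notes on version B (the rewrite author's own statement) =====
-- stated objective: alternative
-- what changed: Replaced the guarded index loop (range(max_len) with a per-cell 'i < len(tab)' test) by padding every column to max_len with '' and transposing the rectangular grid with zip(*padded), then formatting header, alignment and data rows uniformly in one join.
import Mathlib
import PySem

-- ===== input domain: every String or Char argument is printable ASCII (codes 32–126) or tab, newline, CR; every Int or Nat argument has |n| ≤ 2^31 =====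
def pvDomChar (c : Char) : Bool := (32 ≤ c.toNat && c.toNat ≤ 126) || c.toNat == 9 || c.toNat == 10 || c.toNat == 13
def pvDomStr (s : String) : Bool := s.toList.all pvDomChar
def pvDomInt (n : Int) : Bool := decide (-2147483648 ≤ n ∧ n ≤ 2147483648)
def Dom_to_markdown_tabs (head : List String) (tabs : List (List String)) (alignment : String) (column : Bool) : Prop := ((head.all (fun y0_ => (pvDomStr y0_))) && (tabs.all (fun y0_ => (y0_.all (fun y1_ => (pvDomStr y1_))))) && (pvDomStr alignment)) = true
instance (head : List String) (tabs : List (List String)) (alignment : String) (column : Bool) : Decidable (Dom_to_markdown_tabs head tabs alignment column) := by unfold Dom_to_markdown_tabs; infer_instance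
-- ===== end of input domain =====

-- B pads every column to max_len with '' and transposes via zip instead of A's guarded per-index cell loop; same output, same cost (alternative decomposition).


-- ===== PORT A =====
-- Python zip(*tabs) followed by list(map(list, ...)): rows of length len(tabs), truncated to the shortest inner list; [] when tabs is [].
def pyMinLen (tabs : List (List String)) : Nat :=
  match tabs with
  | [] => 0
  | t :: ts => ts.foldl (fun m u => min m u.length) t.length

def pyZipStar (tabs : List (List String)) : List (List String) :=
  if tabs = [] then []
  else (List.range (pyMinLen tabs)).map (fun i => tabs.map (fun t => t.getD i ""))

-- literal port of A: guarded index loop over range(max_len)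
def to_markdown_tabs (head : List String) (tabs : List (List String)) (alignment : String) (column : Bool) : String :=
  let transposed := if column then pyZipStar tabs else tabs
  let max_len := (transposed.map List.length).foldl max 0
  let tabs_list := String.join (head.map (fun i => "| " ++ i ++ " ")) ++ "|\n"
  let tabs_list := tabs_list ++ (String.join (head.map (fun _ => "| " ++ alignment ++ " ")) ++ "|\n")
  (List.range max_len).foldl (fun acc i =>
    let row_data := transposed.map (fun tab => if i < tab.length then tab.getD i "" else "")
    acc ++ (String.join (row_data.map (fun s => "| " ++ s ++ " ")) ++ "|\n")) tabs_list

-- ===== PORT B =====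
-- literal port of B: pad each column to max_len with "", transpose with zip, format all rows uniformly
def to_markdown_tabs_alt (head : List String) (tabs : List (List String)) (alignment : String) (column : Bool) : String :=
  let cols := if column then pyZipStar tabs else tabs
  let max_len := (cols.map List.length).foldl max 0
  let padded := cols.map (fun c => c ++ List.replicate (max_len - c.length) "")
  let rows := [head, List.replicate head.length alignment] ++ pyZipStar padded
  String.join (rows.map (fun row =>
    String.join (row.map (fun cell => "| " ++ cell ++ " ")) ++ "|\n"))

-- ===== PRECONDITION & SPEC =====
-- Pre_ excludes exactly the inputs where Python A raises ValueError (max() of an empty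
-- sequence): tabs empty, or column=True with some empty column so zip(*tabs) is empty.
-- B raises the same ValueError there.
def Pre_to_markdown_tabs (head : List String) (tabs : List (List String)) (alignment : String) (column : Bool) : Prop :=
  if column then tabs ≠ [] ∧ ∀ t ∈ tabs, t ≠ [] else tabs ≠ []
instance (head : List String) (tabs : List (List String)) (alignment : String) (column : Bool) : Decidable (Pre_to_markdown_tabs head tabs alignment column) := by unfold Pre_to_markdown_tabs; infer_instance

def pvWitness_to_markdown_tabs : List String × List (List String) × String × Bool :=
  (["h1", "h2"], [["a", "b"], ["c"]], ":---:", false)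

def Spec_to_markdown_tabs (head : List String) (tabs : List (List String)) (alignment : String) (column : Bool) (out : String) : Prop := out = to_markdown_tabs_alt head tabs alignment column
instance (head : List String) (tabs : List (List String)) (alignment : String) (column : Bool) (out : String) : Decidable (Spec_to_markdown_tabs head tabs alignment column out) := by unfold Spec_to_markdown_tabs; infer_instance

-- ===== CLAIM (what is proved, stated in full; the proofs are below) =====
def Claim_equal_to_markdown_tabs : Prop := ∀ (head : List String) (tabs : List (List String)) (alignment : String) (column : Bool), Dom_to_markdown_tabs head tabs alignment column → Pre_to_markdown_tabs head tabs alignment column → Spec_to_markdown_tabs head tabs alignment column (to_markdown_tabs head tabs alignment column)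

-- ===== LEMMAS AND PROOFS =====

theorem foldl_max_le_init (l : List Nat) (a : Nat) : a ≤ l.foldl max a := by
  induction l generalizing a with
  | nil => simp
  | cons b bs ih => exact le_trans (le_max_left a b) (ih (max a b))

theorem le_foldl_max (l : List Nat) (a : Nat) : ∀ x ∈ l, x ≤ l.foldl max a := by
  induction l generalizing a with
  | nil => simp
  | cons b bs ih =>
    intro x hx
    cases hx with
    | head => exact le_trans (le_max_right a b) (foldl_max_le_init bs (max a b))
    | tail _ h => exact ih (max a b) x h

theorem foldl_append_shift (l : List String) (x y : String) :
    l.foldl (fun r s => r ++ s) (x ++ y) = x ++ l.foldl (fun r s => r ++ s) y := by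
  induction l generalizing y with
  | nil => rfl
  | cons a as ih => simp only [List.foldl_cons, String.append_assoc, ih]

theorem join_cons (a : String) (l : List String) : String.join (a :: l) = a ++ String.join l := by
  show l.foldl (fun r s => r ++ s) ("" ++ a) = a ++ l.foldl (fun r s => r ++ s) ""
  have : ("" ++ a : String) = a ++ "" := by simp
  rw [this, foldl_append_shift]

theorem foldl_append2_join (f : Nat → String) (l : List Nat) (init : String) :
    l.foldl (fun acc i => acc ++ (f i ++ "|\n")) init = init ++ String.join (l.map (fun i => f i ++ "|\n")) := by
  induction l generalizing init with
  | nil => simp [String.join]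
  | cons x xs ih => simp only [List.foldl_cons, List.map_cons, ih, join_cons, String.append_assoc]

theorem foldl_min_const (m : Nat) (ts : List (List String)) :
    (∀ c ∈ ts, c.length = m) → ∀ a, a ≤ m → ts.foldl (fun m u => min m u.length) a = a := by
  induction ts with
  | nil => intro _ a _; rfl
  | cons u us ih =>
    intro h a ha
    have hu : u.length = m := h u (by simp)
    simp only [List.foldl_cons]
    rw [Nat.min_eq_left (by omega)]
    exact ih (fun c hc => h c (by simp [hc])) a ha

theorem pyMinLen_const (m : Nat) (l : List (List String)) (h : ∀ c ∈ l, c.length = m) :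
    l ≠ [] → pyMinLen l = m := by
  cases l with
  | nil => intro h'; exact absurd rfl h'
  | cons t ts =>
    intro _
    have ht : t.length = m := h t (by simp)
    show ts.foldl (fun m u => min m u.length) t.length = m
    rw [foldl_min_const m ts (fun c hc => h c (by simp [hc])) t.length (le_of_eq ht), ht]

theorem foldl_min_pos (ts : List (List String)) :
    (∀ c ∈ ts, c ≠ []) → ∀ a, 0 < a → 0 < ts.foldl (fun m u => min m u.length) a := by
  induction ts with
  | nil => intro _ a ha; simpa using ha
  | cons u us ih =>
    intro h a ha
    simp only [List.foldl_cons]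
    apply ih (fun c hc => h c (by simp [hc]))
    have : u ≠ [] := h u (by simp)
    have := List.length_pos_iff.mpr this
    omega

theorem getD_append_pad (c : List String) (i m : Nat) (him : i < m) :
    (c ++ List.replicate (m - c.length) "").getD i "" = if i < c.length then c.getD i "" else "" := by
  by_cases h : i < c.length
  · simp [h, List.getD, List.getElem?_append_left h]
  · simp only [h, if_false, List.getD]
    rw [List.getElem?_append_right (by omega)]
    by_cases h2 : i - c.length < m - c.length
    · simp [h2]
    · rw [List.getElem?_eq_none (by simp; omega)]; rfl

-- the data rows of B's padded transpose coincide with A's guarded rows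
theorem rows_eq (T : List (List String)) (m : Nat) (hm : ∀ c ∈ T, c.length ≤ m) (hne : T ≠ []) :
    pyZipStar (T.map (fun c => c ++ List.replicate (m - c.length) "")) =
      (List.range m).map (fun i => T.map (fun tab => if i < tab.length then tab.getD i "" else "")) := by
  have hpad_len : ∀ c ∈ T.map (fun c => c ++ List.replicate (m - c.length) ""), c.length = m := by
    intro c hc
    simp only [List.mem_map] at hc
    obtain ⟨c0, hc0, rfl⟩ := hc
    have := hm c0 hc0
    simp; omega
  have hpne : T.map (fun c => c ++ List.replicate (m - c.length) "") ≠ [] := by simpa using hne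
  unfold pyZipStar
  rw [if_neg hpne, pyMinLen_const m _ hpad_len hpne]
  apply List.map_congr_left
  intro i hi
  simp only [List.mem_range] at hi
  rw [List.map_map]
  apply List.map_congr_left
  intro c _
  exact getD_append_pad c i m hi

-- the two ports agree for any nonempty transposed grid T
theorem core_eq (head : List String) (alignment : String) (T : List (List String)) (hne : T ≠ []) :
    (List.range ((T.map List.length).foldl max 0)).foldl (fun acc i =>
        acc ++ (String.join ((T.map (fun tab => if i < tab.length then tab.getD i "" else "")).map (fun s => "| " ++ s ++ " ")) ++ "|\n"))
      ((String.join (head.map (fun i => "| " ++ i ++ " ")) ++ "|\n") ++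
        (String.join (head.map (fun _ => "| " ++ alignment ++ " ")) ++ "|\n")) =
    String.join ((([head, List.replicate head.length alignment] ++
        pyZipStar (T.map (fun c => c ++ List.replicate ((T.map List.length).foldl max 0 - c.length) ""))).map
      (fun row => String.join (row.map (fun cell => "| " ++ cell ++ " ")) ++ "|\n"))) := by
  have hm : ∀ c ∈ T, c.length ≤ (T.map List.length).foldl max 0 := by
    intro c hc
    exact le_foldl_max _ 0 c.length (List.mem_map_of_mem hc)
  rw [rows_eq T _ hm hne]
  rw [foldl_append2_join (fun i => String.join ((T.map (fun tab => if i < tab.length then tab.getD i "" else "")).map (fun s => "| " ++ s ++ " ")))]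
  have halign : (List.replicate head.length alignment).map (fun cell => "| " ++ cell ++ " ")
      = head.map (fun _ => "| " ++ alignment ++ " ") := by
    induction head with
    | nil => rfl
    | cons h hs ih => simp [List.replicate_succ, ih]
  simp only [List.map_cons, List.map_append, List.map_map, List.map_nil, List.cons_append, List.nil_append]
  rw [join_cons, join_cons, halign]
  simp only [List.map_map, Function.comp_def, String.append_assoc]

-- ===== VERDICT (by name: the statement is the Claim_ definition above) =====
theorem to_markdown_tabs_spec : Claim_equal_to_markdown_tabs := by
  intro head tabs alignment column _ hpre
  have hne : (if column then pyZipStar tabs else tabs) ≠ [] := by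
    unfold Pre_to_markdown_tabs at hpre
    cases column with
    | false => simpa using hpre
    | true =>
      simp only [if_pos] at hpre ⊢
      obtain ⟨h1, h2⟩ := hpre
      unfold pyZipStar
      rw [if_neg h1]
      cases tabs with
      | nil => exact absurd rfl h1
      | cons t ts =>
        have hpos : 0 < pyMinLen (t :: ts) := by
          show 0 < ts.foldl (fun m u => min m u.length) t.length
          apply foldl_min_pos ts (fun c hc => h2 c (by simp [hc]))
          exact List.length_pos_iff.mpr (h2 t (by simp))
        simp only [ne_eq, List.map_eq_nil_iff, List.range_eq_nil]
        omega
  show to_markdown_tabs head tabs alignment column = to_markdown_tabs_alt head tabs alignment column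
  exact core_eq head alignment (if column then pyZipStar tabs else tabs) hne
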